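-- pv_equiv track=rewrite | github.com/TokenDogg/NeuroMesh_leetcode | q2.py | brackets_checker
-- ===== SOURCE A (Python) =====
-- def brackets_checker(source):
--     stack = []
--     output = list((source + '.')[:-1])
--
--     for i in range(len(source)):
--         if source[i] == '(':
--             output[i] = ' '
--             stack.insert(0, i)
--         elif source[i] == ')':
--             if len(stack) == 0:
--                 output[i] = '?'
--             else:
--                 output[i] = ' '
--                 stack.pop(0)
--
--         else:
--             output[i] = ' '
--     for i in stack:
--         output[i] = 'x'
--
--     return ''.join(output)
-- ===== SOURCE B (Python) =====
-- def brackets_checker(source):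
--     n = len(source)
--     out = [' '] * n
--     depth = 0
--     for i in range(n):
--         c = source[i]
--         if c == '(':
--             depth += 1
--         elif c == ')':
--             if depth:
--                 depth -= 1
--             else:
--                 out[i] = '?'
--     depth = 0
--     for i in range(n - 1, -1, -1):
--         c = source[i]
--         if c == ')':
--             depth += 1
--         elif c == '(':
--             if depth:
--                 depth -= 1
--             else:
--                 out[i] = 'x'
--     return ''.join(out)
-- ===== Notes on version B (the rewrite author's own statement) =====
-- stated objective: alternative
-- what changed: Replaces the stack of '(' indices (insert(0)/pop(0) plus a final pass over leftover stack entries) by two stack-free clamped counter passes: a forward depth counter marks unmatched ')' with '?', a backward counter marks unmatched '(' with 'x'.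
import Mathlib
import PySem

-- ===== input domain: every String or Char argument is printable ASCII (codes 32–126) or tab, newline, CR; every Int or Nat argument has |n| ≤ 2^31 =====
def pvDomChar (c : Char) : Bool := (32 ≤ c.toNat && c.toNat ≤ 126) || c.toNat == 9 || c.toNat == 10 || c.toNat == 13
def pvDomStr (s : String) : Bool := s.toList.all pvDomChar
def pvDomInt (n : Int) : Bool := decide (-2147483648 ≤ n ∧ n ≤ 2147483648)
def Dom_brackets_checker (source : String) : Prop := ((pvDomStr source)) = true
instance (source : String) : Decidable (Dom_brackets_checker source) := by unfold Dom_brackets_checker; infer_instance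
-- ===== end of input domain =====

-- B replaces A's stack of '(' indices by two stack-free clamped counter passes:
-- a forward pass marking unmatched ')' and a backward pass marking unmatched '('.

-- ===== PORT A =====
-- the main 'for i in range(len(source))' loop: state = (stack, output);
-- stack.insert(0, i) is 'off :: stack', stack.pop(0) drops the head
def bcLoopA (t : List Char) (off : Nat) (stack : List Nat) (out : List Char) :
    List Nat × List Char :=
  match t with
  | [] => (stack, out)
  | c :: t' =>
    if c = '(' then bcLoopA t' (off+1) (off :: stack) (out.set off ' ')
    else if c = ')' then
      match stack with
      | [] => bcLoopA t' (off+1) [] (out.set off '?')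
      | _ :: s' => bcLoopA t' (off+1) s' (out.set off ' ')
    else bcLoopA t' (off+1) stack (out.set off ' ')

def brackets_checker (source : String) : String :=
  let cs := source.toList
  -- output = list((source + '.')[:-1])
  let out0 := PySem.List.slice (cs ++ ['.']) none (some (-1))
  let r := bcLoopA cs 0 [] out0
  -- for i in stack: output[i] = 'x'
  let out2 := r.1.foldl (fun o j => o.set j 'x') r.2
  String.mk out2

-- ===== PORT B =====
-- forward pass: depth counter, unmatched ')' marked '?'
def bcFwd (t : List Char) (off depth : Nat) (out : List Char) : List Char :=
  match t with
  | [] => out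
  | c :: t' =>
    if c = '(' then bcFwd t' (off+1) (depth+1) out
    else if c = ')' then
      if depth ≠ 0 then bcFwd t' (off+1) (depth-1) out
      else bcFwd t' (off+1) depth (out.set off '?')
    else bcFwd t' (off+1) depth out

-- backward pass: 'for i in range(n-1, -1, -1)'; fuel = i+1, source[i] is in
-- range at every call, so getD is exact here
def bcBwd (cs : List Char) : Nat → Nat → List Char → List Char
  | 0, _, out => out
  | i+1, depth, out =>
    let c := cs.getD i ' '
    if c = ')' then bcBwd cs i (depth+1) out
    else if c = '(' then
      if depth ≠ 0 then bcBwd cs i (depth-1) out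
      else bcBwd cs i depth (out.set i 'x')
    else bcBwd cs i depth out

def brackets_checker_alt (source : String) : String :=
  let cs := source.toList
  let out1 := bcFwd cs 0 0 (List.replicate cs.length ' ')
  let out2 := bcBwd cs cs.length 0 out1
  String.mk out2

-- ===== PRECONDITION & SPEC =====
def Spec_brackets_checker (source : String) (out : String) : Prop := out = brackets_checker_alt source
instance (source : String) (out : String) : Decidable (Spec_brackets_checker source out) := by unfold Spec_brackets_checker; infer_instance

-- ===== CLAIM (what is proved, stated in full; the proofs are below) =====
def Claim_equal_brackets_checker : Prop := ∀ (source : String), Dom_brackets_checker source → Spec_brackets_checker source (brackets_checker source)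

-- ===== LEMMAS AND PROOFS =====

-- aK t k = number of pops escaping the left end of t when t is processed and
-- then k further pops arrive from its right
def aK : List Char → Nat → Nat
  | [], k => k
  | c :: t, k => if c = '(' then aK t k - 1 else if c = ')' then aK t k + 1 else aK t k

-- oIdx off t k = indices (offset off) of the '(' of t left unmatched, most
-- recent first, when k pops arrive after t
def oIdx : Nat → List Char → Nat → List Nat
  | _, [], _ => []
  | off, c :: t, k =>
    if c = '(' then
      (if aK t k = 0 then oIdx (off+1) t k ++ [off] else oIdx (off+1) t k)
    else oIdx (off+1) t k

-- the phase-1 character pattern: '?' at unmatched ')', ' ' elsewhere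
def qmarks : List Char → Nat → List Char
  | [], _ => []
  | c :: t, d =>
    if c = '(' then ' ' :: qmarks t (d+1)
    else if c = ')' then (if d = 0 then '?' :: qmarks t 0 else ' ' :: qmarks t (d-1))
    else ' ' :: qmarks t d

-- indices marked 'x' by bcBwd, in marking order
def marksB (cs : List Char) : Nat → Nat → List Nat
  | 0, _ => []
  | i+1, d =>
    let c := cs.getD i ' '
    if c = ')' then marksB cs i (d+1)
    else if c = '(' then (if d ≠ 0 then marksB cs i (d-1) else i :: marksB cs i d)
    else marksB cs i d

lemma take_succ_set_self (o : List Char) (off : Nat) (x : Char) (h : off < o.length) :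
    (o.set off x).take (off+1) = o.take off ++ [x] := by
  rw [List.take_succ, List.take_set]
  simp [h, List.set_eq_of_length_le]

lemma drop_succ_set_self (o : List Char) (off : Nat) (x : Char) :
    (o.set off x).drop (off+1) = o.drop (off+1) := by
  rw [List.drop_set]; simp

lemma loopA_eq (t : List Char) : ∀ (off : Nat) (s : List Nat) (o : List Char),
    o.length = off + t.length →
    bcLoopA t off s o = (oIdx off t 0 ++ s.drop (aK t 0), o.take off ++ qmarks t s.length) := by
  induction t with
  | nil =>
    intro off s o h
    simp only [List.length_nil, Nat.add_zero] at h
    simp [bcLoopA, oIdx, aK, qmarks, List.take_of_length_le h.le]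
  | cons c t ih =>
    intro off s o h
    simp only [List.length_cons] at h
    have hoff : off < o.length := by omega
    simp only [bcLoopA]
    by_cases hc : c = '('
    · rw [if_pos hc]
      rw [ih (off+1) (off::s) _ (by simp; omega)]
      rw [take_succ_set_self o off ' ' hoff]
      simp only [hc, oIdx, aK, qmarks, if_pos rfl, List.length_cons]
      cases hA : aK t 0 with
      | zero => simp [hA, List.append_assoc]
      | succ m => simp [hA, List.drop_succ_cons]
    · by_cases hc2 : c = ')'
      · rw [if_neg hc, if_pos hc2]
        cases s with
        | nil =>
          show bcLoopA t (off+1) [] (o.set off '?') = _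
          rw [ih (off+1) [] _ (by simp; omega)]
          rw [take_succ_set_self o off '?' hoff]
          simp [hc2, hc, oIdx, aK, qmarks]
        | cons x s' =>
          show bcLoopA t (off+1) s' (o.set off ' ') = _
          rw [ih (off+1) s' _ (by simp; omega)]
          rw [take_succ_set_self o off ' ' hoff]
          simp [hc2, hc, oIdx, aK, qmarks, List.drop_succ_cons]
      · rw [if_neg hc, if_neg hc2]
        rw [ih (off+1) s _ (by simp; omega)]
        rw [take_succ_set_self o off ' ' hoff]
        simp [hc, hc2, oIdx, aK, qmarks]

lemma fwd_eq (t : List Char) : ∀ (off d : Nat) (o : List Char),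
    o.length = off + t.length → o.drop off = List.replicate t.length ' ' →
    bcFwd t off d o = o.take off ++ qmarks t d := by
  induction t with
  | nil =>
    intro off d o h hd
    simp only [List.length_nil, Nat.add_zero] at h
    simp [bcFwd, qmarks, List.take_of_length_le h.le]
  | cons c t ih =>
    intro off d o h hd
    simp only [List.length_cons] at h
    have hoff : off < o.length := by omega
    have hget : o[off]? = some ' ' := by
      have h0 : (o.drop off)[0]? = some ' ' := by
        rw [hd]; simp [List.replicate_succ]
      rw [List.getElem?_drop] at h0; simpa using h0
    have htake : o.take (off+1) = o.take off ++ [' '] := by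
      rw [List.take_succ, hget]; rfl
    have hdrop : o.drop (off+1) = List.replicate t.length ' ' := by
      have : o.drop (off + 1) = (o.drop off).drop 1 := by
        rw [List.drop_drop]
      rw [this, hd]; simp [List.replicate_succ]
    simp only [bcFwd]
    by_cases hc : c = '('
    · rw [if_pos hc, ih (off+1) (d+1) o (by omega) hdrop, htake]
      simp [hc, qmarks]
    · by_cases hc2 : c = ')'
      · rw [if_neg hc, if_pos hc2]
        by_cases hdz : d = 0
        · rw [if_neg (by simp [hdz]),
            ih (off+1) d _ (by simp; omega) (by rw [drop_succ_set_self]; exact hdrop)]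
          rw [take_succ_set_self o off '?' hoff]
          simp [hc, hc2, hdz, qmarks]
        · rw [if_pos hdz, ih (off+1) (d-1) o (by omega) hdrop, htake]
          simp [hc, hc2, hdz, qmarks]
      · rw [if_neg hc, if_neg hc2, ih (off+1) d o (by omega) hdrop, htake]
        simp [hc, hc2, qmarks]

lemma bwd_eq (cs : List Char) : ∀ (i d : Nat) (o : List Char),
    bcBwd cs i d o = (marksB cs i d).foldl (fun o j => o.set j 'x') o := by
  intro i
  induction i with
  | zero => intro d o; simp [bcBwd, marksB]
  | succ i ih =>
    intro d o
    simp only [bcBwd, marksB]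
    split_ifs <;> simp [ih]

lemma aK_snoc (c : Char) (k : Nat) : ∀ (t : List Char),
    aK (t ++ [c]) k = aK t (if c = '(' then k - 1 else if c = ')' then k + 1 else k) := by
  intro t
  induction t with
  | nil => simp [aK]
  | cons a t ih => simp [aK, ih]

lemma oIdx_snoc (c : Char) : ∀ (t : List Char) (off k : Nat),
    oIdx off (t ++ [c]) k =
      if c = '(' then
        (if k = 0 then (off + t.length) :: oIdx off t (k-1) else oIdx off t (k-1))
      else if c = ')' then oIdx off t (k+1) else oIdx off t k := by
  intro t
  induction t with
  | nil =>
    intro off k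
    simp only [List.nil_append, oIdx, aK, List.length_nil, Nat.add_zero]
    split_ifs <;> simp_all
  | cons a t ih =>
    intro off k
    simp only [List.cons_append, oIdx, aK_snoc, ih, List.length_cons]
    have harith : off + 1 + t.length = off + (t.length + 1) := by omega
    split_ifs <;> simp_all [harith]

lemma marksB_eq_oIdx (cs : List Char) : ∀ (i : Nat), i ≤ cs.length → ∀ (d : Nat),
    marksB cs i d = oIdx 0 (cs.take i) d := by
  intro i
  induction i with
  | zero => intro _ d; simp [marksB, oIdx]
  | succ i ih =>
    intro hle d
    have hlt : i < cs.length := by omega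
    have htake : cs.take (i+1) = cs.take i ++ [cs[i]] := by
      rw [List.take_succ]; simp [hlt]
    have hget : cs.getD i ' ' = cs[i] := by simp [List.getD, hlt]
    have hlen : (cs.take i).length = i := by simp [hlt.le]
    rw [htake, oIdx_snoc, hlen]
    simp only [marksB, hget]
    by_cases h1 : cs[i] = ')'
    · simp [h1, ih (by omega)]
    · by_cases h2 : cs[i] = '('
      · by_cases hd : d = 0
        · simp [h1, h2, hd, ih (by omega)]
        · simp [h1, h2, hd, ih (by omega)]
      · simp [h1, h2, ih (by omega)]

-- ===== VERDICT (by name: the statement is the Claim_ definition above) =====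
theorem brackets_checker_spec : Claim_equal_brackets_checker := by
  intro source _
  have h0 : PySem.List.slice (source.toList ++ ['.']) none (some (-1)) = source.toList := by
    rw [PySem.List.slice_to_neg_one]; exact List.dropLast_concat
  unfold Spec_brackets_checker brackets_checker brackets_checker_alt
  simp only [h0, loopA_eq source.toList 0 [] source.toList (by simp),
    fwd_eq source.toList 0 0 (List.replicate source.toList.length ' ') (by simp) (by simp),
    bwd_eq source.toList, marksB_eq_oIdx source.toList source.toList.length le_rfl,
    List.take_length]
  simp
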